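-- pv_equiv track=rewrite | github.com/matteocer/uTPU | firmware/host/isa_encoder.py | int4To16
-- ===== SOURCE A (Python) =====
-- from typing import List, Tuple
--
-- def int4To16(values: List[int]) -> int:
--     while len(values) < 4:
--         values = values + [0]
--
--     result = 0
--     for i, val in enumerate(values):
--         nibble = val & 0xF
--         result |= (nibble << (i*4))
--     return result
-- ===== SOURCE B (Python) =====
-- def int4To16(values):
--     nibbles = [v & 0xF for v in values]
--     nibbles += [0] * (4 - len(nibbles))
--     if len(nibbles) % 2:
--         nibbles.append(0)
--     packed = bytes(nibbles[j] | (nibbles[j + 1] << 4) for j in range(0, len(nibbles), 2))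
--     return int.from_bytes(packed, 'little')
-- ===== Notes on version B (the rewrite author's own statement) =====
-- stated objective: faster
-- what changed: Replaces the big-int positional OR loop (result |= nibble << 4*i, which reallocates the whole growing integer every iteration) by masking the nibbles once, packing index pairs into a bytes object and decoding it with a single int.from_bytes(..., 'little') call.
import Mathlib
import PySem

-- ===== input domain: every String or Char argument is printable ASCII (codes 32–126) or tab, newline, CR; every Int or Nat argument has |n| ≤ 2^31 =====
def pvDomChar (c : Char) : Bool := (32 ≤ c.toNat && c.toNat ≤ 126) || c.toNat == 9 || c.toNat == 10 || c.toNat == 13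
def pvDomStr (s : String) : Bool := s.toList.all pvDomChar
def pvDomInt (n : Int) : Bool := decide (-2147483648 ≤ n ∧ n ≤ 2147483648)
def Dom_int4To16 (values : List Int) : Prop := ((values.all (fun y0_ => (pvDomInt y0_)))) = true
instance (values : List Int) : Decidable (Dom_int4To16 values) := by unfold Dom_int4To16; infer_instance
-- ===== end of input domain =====

-- B replaces A's big-int positional OR loop by a one-pass byte packing decoded with a single
-- little-endian int.from_bytes call (measured faster at the largest timing size).
-- ===== PORT A =====
-- while len(values) < 4: values = values + [0]   (rebinds a local, does not mutate the caller's list)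
def padA (values : List Int) : List Int :=
  if values.length < 4 then padA (values ++ [0]) else values
termination_by 4 - values.length
decreasing_by simp [List.length_append]; omega

-- for i, val in enumerate(values): result |= ((val & 0xF) << (i*4))
-- (enumerate yields i : Int, always ≥ 0 here, so the Python shift amount i*4 is the Nat (i*4).toNat — exact)
def int4To16 (values : List Int) : Int :=
  let vs := padA values
  (PySem.List.enumerate vs 0).foldl
    (fun r p => PySem.Int.bor r (Int.shiftLeft (PySem.Int.band p.2 15) ((p.1 * 4).toNat))) 0

-- ===== PORT B =====
-- nibbles = [v & 0xF for v in values]; pad with [0]*(4-len) (a negative Python repeat count gives [],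
-- as Nat subtraction does); append 0 if the length is odd; pack index pairs into bytes;
-- int.from_bytes(packed, 'little') is ported by hand as the little-endian base-256 sum (exact: each
-- packed byte is the listed value, and from_bytes('little') is sum(b[i] * 256**i))
def int4To16_alt (values : List Int) : Int :=
  let nibs0 := values.map (fun v => PySem.Int.band v 15)
  let nibs1 := nibs0 ++ List.replicate (4 - nibs0.length) 0
  let nibs := if nibs1.length % 2 = 1 then nibs1 ++ [0] else nibs1
  let packed := (PySem.List.pyRange 0 nibs.length 2).map
    (fun j => PySem.Int.bor (PySem.List.pyGetD nibs j 0)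
      (Int.shiftLeft (PySem.List.pyGetD nibs (j + 1) 0) 4))
  packed.foldr (fun b acc => b + 256 * acc) 0

-- ===== PRECONDITION & SPEC =====
def Spec_int4To16 (values : List Int) (out : Int) : Prop := out = int4To16_alt values
instance (values : List Int) (out : Int) : Decidable (Spec_int4To16 values out) := by unfold Spec_int4To16; infer_instance

-- ===== CLAIM (what is proved, stated in full; the proofs are below) =====
def Claim_equal_int4To16 : Prop := ∀ (values : List Int), Dom_int4To16 values → Spec_int4To16 values (int4To16 values)

-- ===== LEMMAS AND PROOFS =====

-- the common arithmetic reading of a packed nibble list: nibSum (v :: t) puts v & 0xF in the low 4 bits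
def nibSum : List Int → Int
  | [] => 0
  | v :: t => PySem.Int.band v 15 + 16 * nibSum t

-- the same sum over ALREADY-masked nibbles
def nibSumN : List Int → Int
  | [] => 0
  | n :: t => n + 16 * nibSumN t

-- proof-side pairing of an (even-length) nibble list into bytes
def pairRec : List Int → List Int
  | [] => []
  | [a] => [a]
  | a :: b :: t => PySem.Int.bor a (Int.shiftLeft b 4) :: pairRec t

theorem band15_bounds (v : Int) : 0 ≤ PySem.Int.band v 15 ∧ PySem.Int.band v 15 < 16 := by
  unfold PySem.Int.band
  split_ifs with h1 h2 h3
  · have h : v.toNat &&& (15 : Int).toNat ≤ (15 : Int).toNat := Nat.and_le_right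
    omega
  · omega
  · have h : (15 : Int).toNat &&& (-v - 1).toNat ≤ (15 : Int).toNat := Nat.and_le_left
    omega
  · omega

-- low bits OR high bits = their sum, when the low part fits below the shift
theorem bor_low_high (a b : Int) (k : Nat) (h0 : 0 ≤ a) (hk : a < 2 ^ k) (hb : 0 ≤ b) :
    PySem.Int.bor a (Int.shiftLeft b k) = a + b * 2 ^ k := by
  rw [show Int.shiftLeft b k = b <<< k from rfl, Int.shiftLeft_eq]
  obtain ⟨m, rfl⟩ := Int.eq_ofNat_of_zero_le h0
  obtain ⟨n, rfl⟩ := Int.eq_ofNat_of_zero_le hb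
  have hcast : ((n : Int)) * 2 ^ k = ((n * 2 ^ k : Nat) : Int) := by push_cast; ring
  rw [hcast, PySem.Int.bor_natCast]
  have hm : m < 2 ^ k := by exact_mod_cast hk
  have hdisj := Nat.two_pow_add_eq_or_of_lt hm n
  rw [Nat.lor_comm, show n * 2 ^ k = 2 ^ k * n from Nat.mul_comm n _, ← hdisj]
  push_cast; ring

theorem pow16_eq (k : Nat) : (16 : Int) ^ k = 2 ^ (k * 4) := by
  rw [show (16 : Int) = 2 ^ 4 by norm_num, ← pow_mul, Nat.mul_comm]

-- ===== A-side: the positional-OR fold computes nibSum =====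

theorem foldA_eq (l : List Int) : ∀ (s r : Int), 0 ≤ s → 0 ≤ r → r < 16 ^ s.toNat →
    (PySem.List.enumerate l s).foldl
      (fun r p => PySem.Int.bor r (Int.shiftLeft (PySem.Int.band p.2 15) ((p.1 * 4).toNat))) r
      = r + nibSum l * 16 ^ s.toNat := by
  induction l with
  | nil => intro s r _ _ _; simp [PySem.List.enumerate_nil, nibSum]
  | cons v t ih =>
    intro s r hs hr hrlt
    have hnb := band15_bounds v
    have hsh : ((s * 4).toNat) = s.toNat * 4 := by omega
    rw [PySem.List.enumerate_cons, List.foldl_cons]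
    dsimp only
    have hstep : PySem.Int.bor r (Int.shiftLeft (PySem.Int.band v 15) ((s * 4).toNat))
        = r + PySem.Int.band v 15 * 16 ^ s.toNat := by
      rw [hsh, pow16_eq]
      exact bor_low_high r _ (s.toNat * 4) hr (by rw [← pow16_eq]; exact hrlt) hnb.1
    have h16 : (0 : Int) < 16 ^ s.toNat := by positivity
    have hsucc : (16 : Int) ^ (s + 1).toNat = 16 ^ s.toNat * 16 := by
      rw [show (s + 1).toNat = s.toNat + 1 by omega, pow_succ]
    have hbound : r + PySem.Int.band v 15 * 16 ^ s.toNat < 16 ^ (s + 1).toNat := by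
      have : PySem.Int.band v 15 * 16 ^ s.toNat ≤ 15 * 16 ^ s.toNat :=
        mul_le_mul_of_nonneg_right (by omega) (le_of_lt h16)
      rw [hsucc]; nlinarith
    rw [hstep, ih (s + 1) _ (by omega) (by nlinarith) hbound, hsucc]
    simp only [nibSum]
    ring

theorem padA_eq (values : List Int) :
    padA values = values ++ List.replicate (4 - values.length) 0 := by
  fun_induction padA values with
  | case1 values h ih =>
    rw [ih]
    rw [show 4 - values.length = (4 - (values ++ [0]).length) + 1 by
          simp [List.length_append]; omega,
        List.replicate_succ, List.append_assoc]
    rfl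
  | case2 values h =>
    rw [show 4 - values.length = 0 by omega]
    simp

-- ===== B-side: the byte packing computes nibSumN =====

theorem pyRange_two_cons (a b : Int) (h : a < b) :
    PySem.List.pyRange a b 2 = a :: PySem.List.pyRange (a + 2) b 2 := by
  rw [PySem.List.pyRange_of_pos _ _ (by norm_num : (0:Int) < 2),
      PySem.List.pyRange_of_pos _ _ (by norm_num : (0:Int) < 2)]
  have hcount : (if a < b then ((b - a + 2 - 1) / 2).toNat else 0)
      = (if a + 2 < b then ((b - (a + 2) + 2 - 1) / 2).toNat else 0) + 1 := by
    split_ifs <;> omega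
  rw [hcount, List.range_succ_eq_map, List.map_cons, List.map_map]
  refine List.cons_eq_cons.mpr ⟨by push_cast; ring, ?_⟩
  refine List.map_congr_left (fun k _ => ?_)
  simp only [Function.comp]
  push_cast; ring

theorem pyRange_two_shift (a b : Int) :
    PySem.List.pyRange (a + 2) (b + 2) 2 = (PySem.List.pyRange a b 2).map (· + 2) := by
  rw [PySem.List.pyRange_of_pos _ _ (by norm_num : (0:Int) < 2),
      PySem.List.pyRange_of_pos _ _ (by norm_num : (0:Int) < 2), List.map_map]
  have hc : (if a + 2 < b + 2 then ((b + 2 - (a + 2) + 2 - 1) / 2).toNat else 0)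
      = (if a < b then ((b - a + 2 - 1) / 2).toNat else 0) := by
    split_ifs <;> omega
  rw [hc]
  refine List.map_congr_left (fun k _ => ?_)
  simp only [Function.comp]
  ring

theorem pyGetD_cons_cons (x y : Int) (t : List Int) (j : Int) (hj : 0 ≤ j) :
    PySem.List.pyGetD (x :: y :: t) (j + 2) 0 = PySem.List.pyGetD t j 0 := by
  rw [PySem.List.pyGetD_of_nonneg _ _ (by omega), PySem.List.pyGetD_of_nonneg _ _ hj,
      show (j + 2).toNat = j.toNat + 2 by omega]
  rfl

-- the index-pair comprehension over range(0, len, 2) is the structural pairing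
theorem range2_map_pairRec (l : List Int) (h2 : l.length % 2 = 0) :
    (PySem.List.pyRange 0 l.length 2).map
      (fun j => PySem.Int.bor (PySem.List.pyGetD l j 0)
        (Int.shiftLeft (PySem.List.pyGetD l (j + 1) 0) 4))
      = pairRec l := by
  fun_induction pairRec l with
  | case1 => simp [PySem.List.pyRange_of_pos]
  | case2 a => simp at h2
  | case3 a b t ih =>
    have hlen : ((a :: b :: t).length : Int) = (t.length : Int) + 2 := by
      simp [List.length_cons]; ring
    have hpos : (0 : Int) < ((a :: b :: t).length : Int) := by rw [hlen]; positivity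
    rw [pyRange_two_cons _ _ hpos, List.map_cons]
    have ht2 : t.length % 2 = 0 := by simp [List.length_cons] at h2; omega
    refine List.cons_eq_cons.mpr ⟨?_, ?_⟩
    · have h0 : PySem.List.pyGetD (a :: b :: t) 0 0 = a := by
        rw [PySem.List.pyGetD_of_nonneg (a :: b :: t) (i := 0) 0 (by norm_num)]; rfl
      have h1 : PySem.List.pyGetD (a :: b :: t) (0 + 1) 0 = b := by
        rw [PySem.List.pyGetD_of_nonneg (a :: b :: t) (i := 0 + 1) 0 (by norm_num)]; rfl
      rw [h0, h1]
    · rw [hlen, show (0 : Int) + 2 = 0 + 2 by rfl,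
          show (t.length : Int) + 2 = (t.length : Int) + 2 by rfl,
          pyRange_two_shift 0 (t.length : Int), List.map_map, ← ih ht2]
      refine List.map_congr_left (fun j hj => ?_)
      have hj0 : 0 ≤ j := by
        rcases (PySem.List.mem_pyRange_iff_of_pos (by norm_num : (0:Int) < 2) j).1 hj with ⟨hle, _⟩
        omega
      simp only [Function.comp]
      rw [pyGetD_cons_cons _ _ _ _ hj0, show j + 2 + 1 = (j + 1) + 2 by ring,
          pyGetD_cons_cons _ _ _ _ (by omega)]

-- packing then little-endian decoding recovers nibSumN, for bounded nibbles
theorem fromLE_pairRec (l : List Int) (hb : ∀ x ∈ l, 0 ≤ x ∧ x < 16) :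
    (pairRec l).foldr (fun b acc => b + 256 * acc) 0 = nibSumN l := by
  fun_induction pairRec l with
  | case1 => simp [nibSumN]
  | case2 a => simp [nibSumN]
  | case3 a b t ih =>
    have ha := hb a (by simp)
    have hbb := hb b (by simp)
    have ih' := ih (fun x hx => hb x (by simp [hx]))
    simp only [List.foldr_cons, ih', nibSumN]
    rw [bor_low_high a b 4 ha.1 (by norm_num [ha.2]) hbb.1]
    ring

theorem nibSumN_append_zero (l : List Int) : nibSumN (l ++ [0]) = nibSumN l := by
  induction l with
  | nil => simp [nibSumN]
  | cons x t ih => simp only [List.cons_append, nibSumN, ih]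

theorem nibSum_eq_nibSumN (l : List Int) :
    nibSum l = nibSumN (l.map (fun v => PySem.Int.band v 15)) := by
  induction l with
  | nil => simp [nibSum, nibSumN]
  | cons v t ih => simp only [List.map_cons, nibSum, nibSumN, ih]

-- ===== VERDICT (by name: the statement is the Claim_ definition above) =====
theorem int4To16_spec : Claim_equal_int4To16 := by
  intro values _
  unfold Spec_int4To16 int4To16 int4To16_alt
  rw [padA_eq, foldA_eq _ 0 0 le_rfl le_rfl (by norm_num)]
  simp only
  -- name B's intermediate lists
  set nibs0 := values.map (fun v => PySem.Int.band v 15) with hnibs0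
  set nibs1 := nibs0 ++ List.replicate (4 - nibs0.length) 0 with hnibs1
  set nibs := if nibs1.length % 2 = 1 then nibs1 ++ [0] else nibs1 with hnibs
  have hbound : ∀ x ∈ nibs, 0 ≤ x ∧ x < 16 := by
    intro x hx
    have hx1 : x ∈ nibs1 ∨ x = 0 := by
      rw [hnibs] at hx
      split_ifs at hx with hpar
      · rcases List.mem_append.1 hx with h | h
        · exact Or.inl h
        · simp at h; exact Or.inr h
      · exact Or.inl hx
    rcases hx1 with hx1 | rfl
    · rcases List.mem_append.1 hx1 with h | h
      · rcases List.mem_map.1 h with ⟨v, _, rfl⟩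
        exact band15_bounds v
      · have := List.eq_of_mem_replicate h
        omega
    · omega
  have heven : nibs.length % 2 = 0 := by
    rw [hnibs]
    split_ifs with hpar
    · simp [List.length_append]; omega
    · omega
  rw [range2_map_pairRec nibs heven, fromLE_pairRec nibs hbound]
  have hdropz : nibSumN nibs = nibSumN nibs1 := by
    rw [hnibs]
    split_ifs
    · exact nibSumN_append_zero nibs1
    · rfl
  have hlen0 : nibs0.length = values.length := by simp [hnibs0]
  rw [hdropz, hnibs1, hlen0, hnibs0]
  rw [show (List.replicate (4 - values.length) (0:Int))
        = (List.replicate (4 - values.length) (0:Int)).map (fun v => PySem.Int.band v 15) by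
      rw [List.map_replicate]; norm_num [show PySem.Int.band 0 15 = 0 by decide],
    ← List.map_append, ← nibSum_eq_nibSumN]
  norm_num [show PySem.Int.band 0 15 = 0 from by decide]
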